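-- pv_equiv track=rewrite | github.com/MrBrantCode/unitest_baseline | mut_generate/mist_train_cf/cf_96816/solution.py | identify_palindromes
-- ===== SOURCE A (Python) =====
-- def identify_palindromes(lst):
--     palindromes = []
--     for string in lst:
--         clean_string = ''.join(char for char in string if char.isalnum())
--         lowercase_string = clean_string.lower()
--         if lowercase_string == lowercase_string[::-1]:
--             palindromes.append(string)
--     return palindromes
-- ===== SOURCE B (Python) =====
-- def identify_palindromes(lst):
--     result = []
--     for s in lst:
--         i, j = 0, len(s) - 1
--         ok = True
--         while i < j:
--             if not s[i].isalnum():
--                 i += 1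
--             elif not s[j].isalnum():
--                 j -= 1
--             elif s[i].lower() != s[j].lower():
--                 ok = False
--                 break
--             else:
--                 i += 1
--                 j -= 1
--         if ok:
--             result.append(s)
--     return result
-- ===== Notes on version B (the rewrite author's own statement) =====
-- stated objective: faster
-- what changed: Replaces build-clean-string/lowercase/compare-with-reversed-copy by an in-place two-pointer scan over the original string that skips non-alphanumerics and compares case-folded end characters, exiting at the first mismatch without building any intermediate string.
import Mathlib
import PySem

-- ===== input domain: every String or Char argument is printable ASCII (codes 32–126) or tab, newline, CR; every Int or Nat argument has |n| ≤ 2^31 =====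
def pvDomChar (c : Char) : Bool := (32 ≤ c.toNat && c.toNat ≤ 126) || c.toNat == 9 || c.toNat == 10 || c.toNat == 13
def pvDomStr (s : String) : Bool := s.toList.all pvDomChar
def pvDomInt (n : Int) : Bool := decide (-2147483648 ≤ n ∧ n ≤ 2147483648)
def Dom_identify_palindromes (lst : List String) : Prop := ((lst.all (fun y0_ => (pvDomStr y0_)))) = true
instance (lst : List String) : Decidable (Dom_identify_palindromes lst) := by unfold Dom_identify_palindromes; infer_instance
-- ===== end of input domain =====

-- B replaces A's clean/lower/reverse-and-compare by a two-pointer scan over the original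
-- string (skip non-alphanumerics, compare case-folded ends, stop at first mismatch): no
-- intermediate strings and an early exit; return value proved equal on all inputs.

-- ===== PORT A =====
-- ''.join(char for char in string if char.isalnum()) produces exactly the filtered
-- character sequence, ported as List.filter on the code points.
def identify_palindromes (lst : List String) : List String :=
  lst.foldl (fun palindromes s =>
    let clean_string := s.toList.filter PySem.Chars.isalnum
    let lowercase_string := PySem.Chars.lower clean_string
    if some lowercase_string = PySem.List.slice? lowercase_string none none (-1)
    then palindromes ++ [s] else palindromes) []

-- ===== PORT B =====
-- the while loop of Source B; `List.getD _ ' '` is exact here because every access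
-- happens under i < j ≤ len - 1, so the index is in range (Python s[i]/s[j]).
def pvScan (cs : List Char) (i j : Nat) : Bool :=
  if i < j then
    if !PySem.Chars.isalnum (cs.getD i ' ') then pvScan cs (i+1) j
    else if !PySem.Chars.isalnum (cs.getD j ' ') then pvScan cs i (j-1)
    else if PySem.Chars.lowerChar (cs.getD i ' ') ≠ PySem.Chars.lowerChar (cs.getD j ' ')
    then false
    else pvScan cs (i+1) (j-1)
  else true
termination_by j - i
decreasing_by all_goals omega

def identify_palindromes_alt (lst : List String) : List String :=
  lst.foldl (fun result s =>
    if pvScan s.toList 0 (s.toList.length - 1) then result ++ [s] else result) []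

-- ===== PRECONDITION & SPEC =====
def Spec_identify_palindromes (lst : List String) (out : List String) : Prop := out = identify_palindromes_alt lst
instance (lst : List String) (out : List String) : Decidable (Spec_identify_palindromes lst out) := by unfold Spec_identify_palindromes; infer_instance

-- ===== CLAIM (what is proved, stated in full; the proofs are below) =====
def Claim_equal_identify_palindromes : Prop := ∀ (lst : List String), Dom_identify_palindromes lst → Spec_identify_palindromes lst (identify_palindromes lst)

-- ===== LEMMAS AND PROOFS =====

/-- the cleaned, case-folded content of a character list -/
def pvProc (l : List Char) : List Char :=
  (l.filter PySem.Chars.isalnum).map PySem.Chars.lowerChar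

/-- the segment cs[i..j] (both ends included) -/
def pvSeg (cs : List Char) (i j : Nat) : List Char := (cs.take (j+1)).drop i

lemma pvShortPal {l : List Char} (h : l.length ≤ 1) : l = l.reverse := by
  match l with
  | [] => rfl
  | [a] => rfl
  | a :: b :: t => simp at h

lemma pvSnocPal (a b : Char) (m : List Char) :
    (a :: m ++ [b] = (a :: m ++ [b]).reverse) ↔ (a = b ∧ m = m.reverse) := by
  constructor
  · intro h
    have h' : a :: (m ++ [b]) = b :: (m.reverse ++ [a]) := by simpa using h
    obtain ⟨h1, h2⟩ := List.cons.inj h'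
    subst h1
    exact ⟨rfl, List.append_cancel_right h2⟩
  · rintro ⟨rfl, h⟩
    conv_lhs => rw [h]
    simp

lemma pvScan_eq (cs : List Char) (i j : Nat) (hj : j < cs.length) :
    pvScan cs i j = decide (pvProc (pvSeg cs i j) = (pvProc (pvSeg cs i j)).reverse) := by
  by_cases hij : i < j
  · have hjlen : (cs.take (j+1)).length = j + 1 := by simp; omega
    have hci : (cs.take (j+1))[i]'(by omega) = cs[i]'(by omega) := List.getElem_take
    have hgi : cs.getD i ' ' = cs[i]'(by omega) := by
      rw [List.getD_eq_getElem?_getD, List.getElem?_eq_getElem (by omega)]; rfl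
    have hgj : cs.getD j ' ' = cs[j]'hj := by
      rw [List.getD_eq_getElem?_getD, List.getElem?_eq_getElem hj]; rfl
    -- cs[i..j] = cs[i] :: cs[i+1..j]
    have hcons : pvSeg cs i j = cs[i]'(by omega) :: pvSeg cs (i+1) j := by
      unfold pvSeg
      rw [List.drop_eq_getElem_cons (by omega), hci]
    -- cs[i..j] = cs[i..j-1] ++ [cs[j]]
    have hsnoc : pvSeg cs i j = pvSeg cs i (j-1) ++ [cs[j]'hj] := by
      unfold pvSeg
      have h1 : cs.take (j+1) = cs.take j ++ [cs[j]'hj] := by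
        rw [List.take_add_one, List.getElem?_eq_getElem hj]; rfl
      have h2 : (j-1)+1 = j := by omega
      rw [h1, List.drop_append_of_le_length (by simp; omega), h2]
    rw [pvScan]
    simp only [if_pos hij]
    by_cases hai : PySem.Chars.isalnum (cs.getD i ' ')
    · by_cases haj : PySem.Chars.isalnum (cs.getD j ' ')
      · -- both ends alphanumeric
        have hmid : pvSeg cs (i+1) j = pvSeg cs (i+1) (j-1) ++ [cs[j]'hj] := by
          unfold pvSeg
          have h1 : cs.take (j+1) = cs.take j ++ [cs[j]'hj] := by
            rw [List.take_add_one, List.getElem?_eq_getElem hj]; rfl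
          have h2 : (j-1)+1 = j := by omega
          rw [h1, List.drop_append_of_le_length (by simp; omega), h2]
        have hdec : pvProc (pvSeg cs i j)
            = PySem.Chars.lowerChar (cs[i]'(by omega)) :: pvProc (pvSeg cs (i+1) (j-1))
              ++ [PySem.Chars.lowerChar (cs[j]'hj)] := by
          rw [hcons, hmid]
          rw [hgi] at hai
          rw [hgj] at haj
          simp [pvProc, hai, haj]
        simp only [hai, haj, Bool.not_true, Bool.false_eq_true, if_false, ite_not]
        by_cases heq : PySem.Chars.lowerChar (cs.getD i ' ') = PySem.Chars.lowerChar (cs.getD j ' ')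
        · rw [if_pos heq, pvScan_eq cs (i+1) (j-1) (by omega), hdec]
          rw [hgi, hgj] at heq
          simp only [decide_eq_decide]
          rw [pvSnocPal]
          constructor
          · intro h; exact ⟨heq, h⟩
          · rintro ⟨-, h⟩; exact h
        · rw [if_neg heq, hdec]
          rw [hgi, hgj] at heq
          have : ¬ (PySem.Chars.lowerChar (cs[i]'(by omega)) :: pvProc (pvSeg cs (i+1) (j-1))
              ++ [PySem.Chars.lowerChar (cs[j]'hj)]
              = (PySem.Chars.lowerChar (cs[i]'(by omega)) :: pvProc (pvSeg cs (i+1) (j-1))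
              ++ [PySem.Chars.lowerChar (cs[j]'hj)]).reverse) := by
            rw [pvSnocPal]
            rintro ⟨h1, -⟩; exact heq h1
          exact (decide_eq_false this).symm
      · -- last character not alphanumeric: drop it
        have : pvProc (pvSeg cs i j) = pvProc (pvSeg cs i (j-1)) := by
          rw [hsnoc]
          rw [hgj] at haj
          simp [pvProc, haj]
        simp only [hai, haj, Bool.not_true, Bool.not_false, Bool.false_eq_true, if_false, if_true]
        rw [pvScan_eq cs i (j-1) (by omega), this]
    · -- first character not alphanumeric: drop it
      have : pvProc (pvSeg cs i j) = pvProc (pvSeg cs (i+1) j) := by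
        rw [hcons]
        rw [hgi] at hai
        simp [pvProc, hai]
      simp only [hai, Bool.not_false, if_true]
      rw [pvScan_eq cs (i+1) j hj, this]
  · -- pointers met or crossed: at most one character remains
    rw [pvScan]
    simp only [if_neg hij]
    have hlen : (pvProc (pvSeg cs i j)).length ≤ 1 := by
      have h1 : (pvSeg cs i j).length ≤ 1 := by
        unfold pvSeg
        simp only [List.length_drop, List.length_take]
        omega
      calc (pvProc (pvSeg cs i j)).length
          ≤ (pvSeg cs i j).length := by
            unfold pvProc; rw [List.length_map]; exact List.length_filter_le _ _
        _ ≤ 1 := h1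
    simp [← pvShortPal hlen]
termination_by j - i
decreasing_by all_goals omega

/-- per-string agreement of the two membership tests -/
lemma pvCond_eq (s : String) :
    (some (PySem.Chars.lower (s.toList.filter PySem.Chars.isalnum))
      = PySem.List.slice? (PySem.Chars.lower (s.toList.filter PySem.Chars.isalnum)) none none (-1))
    ↔ pvScan s.toList 0 (s.toList.length - 1) = true := by
  have hlow : PySem.Chars.lower (s.toList.filter PySem.Chars.isalnum) = pvProc s.toList := rfl
  rw [hlow, PySem.List.slice?_none_none_neg_one, Option.some_inj]
  match hcs : s.toList with
  | [] => simp [pvProc, pvScan]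
  | c :: t =>
    have hlen : (c :: t).length - 1 < (c :: t).length := by simp
    rw [pvScan_eq (c :: t) 0 ((c :: t).length - 1) hlen]
    have hseg : pvSeg (c :: t) 0 ((c :: t).length - 1) = c :: t := by
      unfold pvSeg
      have : (c :: t).length - 1 + 1 = (c :: t).length := by simp
      rw [this, List.take_length, List.drop_zero]
    rw [hseg]
    simp

lemma pvFold_eq (lst : List String) (acc : List String) :
    lst.foldl (fun palindromes s =>
      if some (PySem.Chars.lower (s.toList.filter PySem.Chars.isalnum))
          = PySem.List.slice? (PySem.Chars.lower (s.toList.filter PySem.Chars.isalnum)) none none (-1)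
      then palindromes ++ [s] else palindromes) acc
    = lst.foldl (fun result s =>
        if pvScan s.toList 0 (s.toList.length - 1) then result ++ [s] else result) acc := by
  induction lst generalizing acc with
  | nil => rfl
  | cons s t ih =>
    simp only [List.foldl_cons]
    by_cases h : pvScan s.toList 0 (s.toList.length - 1) = true
    · rw [if_pos ((pvCond_eq s).mpr h), if_pos h, ih]
    · rw [if_neg (fun hc => h ((pvCond_eq s).mp hc)), if_neg h, ih]

-- ===== VERDICT (by name: the statement is the Claim_ definition above) =====
theorem identify_palindromes_spec : Claim_equal_identify_palindromes := by
  intro lst _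
  show identify_palindromes lst = identify_palindromes_alt lst
  unfold identify_palindromes identify_palindromes_alt
  exact pvFold_eq lst []
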